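-- pv_equiv track=rewrite | github.com/RuslanNikitin39/CourseProjects | CourseProject1/Main.py | get_photo_name
-- ===== SOURCE A (Python) =====
-- def get_photo_name(photo_name, photo_date, result_dict):
--     """Нужна уникальность, есть фото без лайков, залитые в одно время,
--     поэтому добавим префикс
--     """
--     prefix = 0
--     new_photo_name = photo_name
--     while not result_dict.get(new_photo_name) == None:
--         if not photo_date == 0:
--             photo_name = f'{photo_date}_{photo_name}'
--             new_photo_name = photo_name
--             photo_date = 0
--         else:
--             prefix += 1
--             new_photo_name = f'{prefix}_{photo_name}'
--
--     return new_photo_name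
-- ===== SOURCE B (Python) =====
-- def _candidates(name, date):
--     yield name
--     if date != 0:
--         name = f'{date}_{name}'
--         yield name
--     i = 0
--     while True:
--         i += 1
--         yield f'{i}_{name}'
--
--
-- def get_photo_name(photo_name, photo_date, result_dict):
--     return next(c for c in _candidates(photo_name, photo_date)
--                 if result_dict.get(c) is None)
-- ===== Notes on version B (the rewrite author's own statement) =====
-- stated objective: simpler
-- what changed: B separates candidate generation (a generator yielding name, then date_name, then i_name) from selection (next over the stream), replacing A's while loop that mutates prefix/photo_name/photo_date state.
import Mathlib
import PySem

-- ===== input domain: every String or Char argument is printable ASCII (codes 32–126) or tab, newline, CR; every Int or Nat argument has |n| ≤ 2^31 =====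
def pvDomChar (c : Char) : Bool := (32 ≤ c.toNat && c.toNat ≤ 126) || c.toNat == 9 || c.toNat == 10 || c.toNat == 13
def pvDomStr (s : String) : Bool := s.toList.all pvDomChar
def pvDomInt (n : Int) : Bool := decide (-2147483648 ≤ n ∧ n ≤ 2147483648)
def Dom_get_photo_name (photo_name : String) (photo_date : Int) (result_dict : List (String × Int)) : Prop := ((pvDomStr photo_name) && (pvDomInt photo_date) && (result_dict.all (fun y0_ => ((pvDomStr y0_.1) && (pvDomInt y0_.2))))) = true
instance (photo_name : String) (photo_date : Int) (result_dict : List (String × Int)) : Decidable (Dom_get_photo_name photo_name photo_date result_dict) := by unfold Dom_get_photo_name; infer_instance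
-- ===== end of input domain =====

-- B replaces A's state-mutating while loop by a candidate stream (name, date_name, 1_.., 2_..)
-- plus first-free selection; objective: simpler decomposition, same probe order and cost.
-- Both ports are fuel-bounded at |result_dict|+2 probes, which always suffices (the probed
-- names are pairwise distinct, so a free one occurs among the first |result_dict|+1); on fuel
-- exhaustion both return the next unprobed candidate, so the equivalence is total.

-- dict.get k (first match in the association list); shared dict primitive of both ports
def pvGet? (d : List (String × Int)) (k : String) : Option Int :=
  (d.find? (fun p => p.1 == k)).map (·.2)

-- ===== PORT A =====
-- the while loop of A; state = (pfx=prefix, name=photo_name, cand=new_photo_name, date=photo_date)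
def pvLoopA (d : List (String × Int)) : Nat → Int → String → String → Int → String
  | 0, _, _, cand, _ => cand
  | fuel+1, pfx, name, cand, date =>
    if (pvGet? d cand).isNone then cand
    else if date ≠ 0 then
      pvLoopA d fuel pfx (PySem.Int.toStr date ++ "_" ++ name) (PySem.Int.toStr date ++ "_" ++ name) 0
    else
      pvLoopA d fuel (pfx + 1) name (PySem.Int.toStr (pfx + 1) ++ "_" ++ name) 0

def get_photo_name (photo_name : String) (photo_date : Int) (result_dict : List (String × Int)) : String :=
  pvLoopA result_dict (result_dict.length + 2) 0 photo_name photo_name photo_date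

-- ===== PORT B =====
-- Source B's generator, materialised as the first (head ++ tailN) candidates; find? = next(... if ...)
def get_photo_name_alt (photo_name : String) (photo_date : Int) (result_dict : List (String × Int)) : String :=
  let base := if photo_date ≠ 0 then PySem.Int.toStr photo_date ++ "_" ++ photo_name else photo_name
  let head := if photo_date ≠ 0 then [photo_name, base] else [photo_name]
  let tailN := result_dict.length + 2 - head.length
  let cands := head ++ (List.range tailN).map (fun (i : Nat) => PySem.Int.toStr ((i : Int) + 1) ++ "_" ++ base)
  (cands.find? (fun c => (pvGet? result_dict c).isNone)).getD
    (PySem.Int.toStr ((tailN : Int) + 1) ++ "_" ++ base)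

-- ===== PRECONDITION & SPEC =====
def Spec_get_photo_name (photo_name : String) (photo_date : Int) (result_dict : List (String × Int)) (out : String) : Prop := out = get_photo_name_alt photo_name photo_date result_dict
instance (photo_name : String) (photo_date : Int) (result_dict : List (String × Int)) (out : String) : Decidable (Spec_get_photo_name photo_name photo_date result_dict out) := by unfold Spec_get_photo_name; infer_instance

-- ===== CLAIM (what is proved, stated in full; the proofs are below) =====
def Claim_equal_get_photo_name : Prop := ∀ (photo_name : String) (photo_date : Int) (result_dict : List (String × Int)), Dom_get_photo_name photo_name photo_date result_dict → Spec_get_photo_name photo_name photo_date result_dict (get_photo_name photo_name photo_date result_dict)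

-- ===== LEMMAS AND PROOFS =====

-- the tail of numbered candidates after the one currently probed, counters starting at p+1
def pvTail (p : Int) (name : String) (f : Nat) : List String :=
  (List.range f).map (fun (i : Nat) => PySem.Int.toStr (p + 1 + (i : Int)) ++ "_" ++ name)

theorem pvTail_succ (p : Int) (name : String) (f : Nat) :
    pvTail p name (f + 1) =
      (PySem.Int.toStr (p + 1) ++ "_" ++ name) :: pvTail (p + 1) name f := by
  unfold pvTail
  rw [List.range_succ_eq_map, List.map_cons, List.map_map]
  congr 1
  · norm_num
  · apply List.map_congr_left
    intro i _
    have h2 : p + 1 + ((Nat.succ i : Nat) : Int) = p + 1 + 1 + (i : Int) := by push_cast; ring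
    simp only [Function.comp_apply, h2]

-- the date-0 phase of A's loop finds the first free candidate in cand :: pvTail, else falls to the next one
theorem pvLoopA_zero (d : List (String × Int)) (name : String) :
    ∀ (f : Nat) (p : Int) (cand : String),
      pvLoopA d (f + 1) p name cand 0 =
        (((cand :: pvTail p name f).find?
            (fun c => (pvGet? d c).isNone)).getD
          (PySem.Int.toStr (p + 1 + (f : Int)) ++ "_" ++ name)) := by
  intro f
  induction f with
  | zero =>
    intro p cand
    simp only [pvTail, List.range_zero, List.map_nil, List.find?]
    by_cases h : (pvGet? d cand).isNone
    · simp [pvLoopA, h]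
    · simp only [Bool.not_eq_true] at h
      simp [pvLoopA, h]
  | succ f ih =>
    intro p cand
    by_cases h : (pvGet? d cand).isNone
    · simp [pvLoopA, h, List.find?]
    · have hA : pvLoopA d (f + 1 + 1) p name cand 0 =
          pvLoopA d (f + 1) (p + 1) name (PySem.Int.toStr (p + 1) ++ "_" ++ name) 0 := by
        simp only [Bool.not_eq_true] at h
        simp [pvLoopA, h]
      rw [hA, ih (p + 1) (PySem.Int.toStr (p + 1) ++ "_" ++ name), pvTail_succ]
      simp only [Bool.not_eq_true] at h
      simp only [List.find?, h]
      have h2 : p + 1 + 1 + (f : Int) = p + 1 + ((f + 1 : Nat) : Int) := by push_cast; ring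
      rw [h2]

-- ===== VERDICT (by name: the statement is the Claim_ definition above) =====
theorem get_photo_name_spec : Claim_equal_get_photo_name := by
  intro name date d _
  unfold Spec_get_photo_name get_photo_name get_photo_name_alt
  by_cases hd : date = 0
  · -- no date prefix: A's whole loop is its date-0 phase starting at name
    simp only [hd, ne_eq, not_true_eq_false, if_false]
    have h := pvLoopA_zero d name (d.length + 1) 0 name
    rw [show d.length + 1 + 1 = d.length + 2 from rfl] at h
    rw [h]
    have ht : pvTail 0 name (d.length + 1) =
        (List.range (d.length + 2 - 1)).map
          (fun (i : Nat) => PySem.Int.toStr ((i : Int) + 1) ++ "_" ++ name) := by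
      unfold pvTail
      rw [show d.length + 2 - 1 = d.length + 1 from rfl]
      apply List.map_congr_left
      intro i _
      have h2 : (0 : Int) + 1 + (i : Int) = (i : Int) + 1 := by ring
      rw [h2]
    rw [ht]
    simp only [List.singleton_append, List.length_cons, List.length_nil]
    have h3 : (0 : Int) + 1 + ((d.length + 1 : Nat) : Int) = ((d.length + 2 - 1 : Nat) : Int) + 1 := by
      rw [show d.length + 2 - 1 = d.length + 1 from rfl]; push_cast; ring
    rw [h3]
  · -- date prefix: one probe of name, then the date-0 phase starting at date_name
    simp only [hd, ne_eq, not_false_iff, if_true]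
    set base := PySem.Int.toStr date ++ "_" ++ name with hbase
    by_cases h : (pvGet? d name).isNone
    · simp [pvLoopA, h]
    · have hA : pvLoopA d (d.length + 2) 0 name name date =
          pvLoopA d (d.length + 1) 0 base base 0 := by
        simp only [Bool.not_eq_true] at h
        simp [pvLoopA, h, hd, hbase]
      rw [hA, pvLoopA_zero d base d.length 0 base]
      simp only [Bool.not_eq_true] at h
      simp only [List.cons_append, List.find?, h, List.nil_append,
        List.length_cons, List.length_nil]
      have ht : pvTail 0 base d.length =
          (List.range (d.length + 2 - 2)).map
            (fun (i : Nat) => PySem.Int.toStr ((i : Int) + 1) ++ "_" ++ base) := by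
        unfold pvTail
        rw [show d.length + 2 - 2 = d.length from rfl]
        apply List.map_congr_left
        intro i _
        have h2 : (0 : Int) + 1 + (i : Int) = (i : Int) + 1 := by ring
        rw [h2]
      rw [ht]
      have h3 : (0 : Int) + 1 + ((d.length : Nat) : Int) = ((d.length + 2 - 2 : Nat) : Int) + 1 := by
        rw [show d.length + 2 - 2 = d.length from rfl]; push_cast; ring
      rw [h3]
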